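-- pv_equiv track=rewrite | github.com/cbsag/IRT-NLA | P1NLA.py | MeasuredEntityDetection
-- ===== SOURCE A (Python) =====
-- def MeasuredEntityDetection(posTag, gazetteer, ne):
--     ouput=[]
--       #To focus on expected measured entities, the module first filters away cardinal number terms that are not labeled as named things.
--     cd_words=list(filter(lambda x: x[1]=="CD" and x[0] not in ne,posTag))
--     nextIndex=dict()
-- #   Indexing
--     for i in cd_words:
--           index=0
--           if( i in nextIndex.keys()):
--                 index=posTag.index(i,nextIndex[i]+1)
--                 nextIndex[i]=index
--           else:
--                 index=posTag.index(i)
--                 nextIndex[i]=index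
--           result=""
--           if posTag[index][1] == "CD" and all(gaz_word.lower() not in i[0].lower() for gaz_word in gazetteer.get("Year", [])):
--             if(posTag[index-1] =="Currency"):
--                 result+=posTag[index-1][0]
--           result+=posTag[index][0]+""
--           indexBound=index+4 if len(posTag)>index+4 else len(posTag)
--           for j in range(index,indexBound):
--                 if(posTag[j][1] in ["Unit","Currency","NNS","NN","Product","Time"]) : # add VBP for ( 2 am)
--                         result += " " + posTag[j][0]
--                   #     result+=" "+posTag[j][0]
--           ouput.append(result)
--     return ouput
-- ===== SOURCE B (Python) =====
-- def MeasuredEntityDetection(posTag, gazetteer, ne):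
--     # One pass over enumerate(posTag): the position of each CD token is its own
--     # enumerate index, so no .index/nextIndex bookkeeping is needed.  The Year
--     # gazetteer guard and the posTag[index-1]=="Currency" test in A guard a
--     # branch that can never fire (a (word,tag) pair never equals the string
--     # "Currency"), so they are dropped.
--     keep = {"Unit", "Currency", "NNS", "NN", "Product", "Time"}
--     n = len(posTag)
--     out = []
--     for i, (word, tag) in enumerate(posTag):
--         if tag == "CD" and word not in ne:
--             parts = [word]
--             for j in range(i, min(i + 4, n)):
--                 if posTag[j][1] in keep:
--                     parts.append(posTag[j][0])
--             out.append(" ".join(parts))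
--     return out
-- ===== Notes on version B (the rewrite author's own statement) =====
-- stated objective: simpler
-- what changed: Replaces A's filter+nextIndex-dict+repeated list.index machinery with a single pass over enumerate(posTag) (a CD token's position is its own enumerate index) and drops A's two dead guards (the Year-gazetteer test guards only a branch comparing a (word,tag) pair with the string "Currency", which is always False).
import Mathlib
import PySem

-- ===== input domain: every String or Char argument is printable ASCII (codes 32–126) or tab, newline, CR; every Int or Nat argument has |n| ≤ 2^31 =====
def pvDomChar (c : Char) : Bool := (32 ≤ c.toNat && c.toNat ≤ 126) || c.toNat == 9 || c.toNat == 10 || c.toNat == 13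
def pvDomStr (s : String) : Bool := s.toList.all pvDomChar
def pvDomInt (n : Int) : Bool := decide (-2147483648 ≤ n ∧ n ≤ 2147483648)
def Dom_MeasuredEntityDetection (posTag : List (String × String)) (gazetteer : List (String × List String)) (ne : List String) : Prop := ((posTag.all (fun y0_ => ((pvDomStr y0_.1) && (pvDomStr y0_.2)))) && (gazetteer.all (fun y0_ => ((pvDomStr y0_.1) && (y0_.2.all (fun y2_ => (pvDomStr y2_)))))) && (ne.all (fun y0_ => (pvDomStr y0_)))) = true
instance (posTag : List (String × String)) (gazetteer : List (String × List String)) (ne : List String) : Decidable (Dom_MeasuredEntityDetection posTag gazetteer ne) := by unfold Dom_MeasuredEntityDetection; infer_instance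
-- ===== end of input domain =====

-- B replaces A's filter + nextIndex-dict + repeated list.index machinery by one pass over
-- enumerate(posTag) (the position of a CD token IS its enumerate index) and drops A's two
-- dead guards (their branch can never fire); objective: simpler.

-- ===== PORT A =====
def pvTagList : List String := ["Unit", "Currency", "NNS", "NN", "Product", "Time"]

-- list.index(v, start) for a nonnegative start: search xs[start:] and shift (exact there)
def pvIndexFrom (xs : List (String × String)) (v : String × String) (start : Nat) : Option Nat :=
  (PySem.List.index? (xs.drop start) v).map (· + start)

-- one iteration of A's 'for i in cd_words' loop; state = (nextIndex, ouput)
def pvStepA (posTag : List (String × String)) (gazetteer : List (String × List String))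
    (st : PySem.Dict (String × String) Nat × List String) (i : String × String) :
    PySem.Dict (String × String) Nat × List String :=
  let nextIndex := st.1
  let ouput := st.2
  let index : Nat :=
    match nextIndex.get? i with
    | some prev => (pvIndexFrom posTag i (prev + 1)).getD 0  -- ValueError unreachable: i occurs again at/after prev+1
    | none => (PySem.List.index? posTag i).getD 0            -- ValueError unreachable: i ∈ posTag
  let nextIndex := nextIndex.insert i index
  let result : String := ""
  -- 'if posTag[index][1]=="CD" and all(Year guard)': its body tests posTag[index-1] == "Currency",
  -- a (word,tag) pair against a string — always False in Python — so result is unchanged either way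
  let result :=
    if ((posTag[index]?.map Prod.snd).getD "" == "CD")
        && (PySem.Dict.getD (PySem.Dict.mk gazetteer) "Year" []).all
             (fun gaz_word => !(PySem.Str.isIn (PySem.Str.lower gaz_word) (PySem.Str.lower i.1)))
    then result else result
  let result := result ++ (posTag[index]?.map Prod.fst).getD "" ++ ""   -- index from .index is in range
  let indexBound : Nat := if posTag.length > index + 4 then index + 4 else posTag.length
  let result := (PySem.List.pyRange index indexBound 1).foldl
    (fun result j =>
      let wt := (PySem.List.pyGet? posTag j).getD ("", "")   -- j ∈ [index, indexBound) is in range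
      if pvTagList.contains wt.2 then result ++ " " ++ wt.1 else result) result
  (nextIndex, ouput ++ [result])

def MeasuredEntityDetection (posTag : List (String × String)) (gazetteer : List (String × List String)) (ne : List String) : List String :=
  let cd_words := posTag.filter (fun x => x.2 == "CD" && !(ne.contains x.1))
  (cd_words.foldl (pvStepA posTag gazetteer) (PySem.Dict.empty, [])).2

-- ===== PORT B =====
def pvKeep : PySem.Set String := PySem.Set.ofList ["Unit", "Currency", "NNS", "NN", "Product", "Time"]

-- B's body of the 'if tag == "CD" and word not in ne' branch: build parts, join with spaces
def pvEmitB (posTag : List (String × String)) (n : Nat) (i : Int) (word : String) : String :=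
  let parts : List String := [word]
  let parts := (PySem.List.pyRange i (min (i + 4) (n : Int)) 1).foldl
    (fun parts j =>
      let wt := (PySem.List.pyGet? posTag j).getD ("", "")   -- j ∈ [i, min(i+4,n)) is in range
      if PySem.Set.contains pvKeep wt.2 then parts ++ [wt.1] else parts) parts
  PySem.Str.join " " parts

def MeasuredEntityDetection_alt (posTag : List (String × String)) (gazetteer : List (String × List String)) (ne : List String) : List String :=
  let n := posTag.length
  (PySem.List.enumerate posTag).foldl
    (fun out p =>
      if p.2.2 == "CD" && !(ne.contains p.2.1) then out ++ [pvEmitB posTag n p.1 p.2.1] else out) []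

-- ===== PRECONDITION & SPEC =====
def Spec_MeasuredEntityDetection (posTag : List (String × String)) (gazetteer : List (String × List String)) (ne : List String) (out : List String) : Prop := out = MeasuredEntityDetection_alt posTag gazetteer ne
instance (posTag : List (String × String)) (gazetteer : List (String × List String)) (ne : List String) (out : List String) : Decidable (Spec_MeasuredEntityDetection posTag gazetteer ne out) := by unfold Spec_MeasuredEntityDetection; infer_instance

-- ===== CLAIM (what is proved, stated in full; the proofs are below) =====
def Claim_equal_MeasuredEntityDetection : Prop := ∀ (posTag : List (String × String)) (gazetteer : List (String × List String)) (ne : List String), Dom_MeasuredEntityDetection posTag gazetteer ne → Spec_MeasuredEntityDetection posTag gazetteer ne (MeasuredEntityDetection posTag gazetteer ne)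

-- ===== LEMMAS AND PROOFS =====

def pvPred (ne : List String) (x : String × String) : Bool := x.2 == "CD" && !(ne.contains x.1)

-- invariant of A's nextIndex dict after processing the cd_words that occur in 'pre'
def pvInv (ne : List String) (pre : List (String × String)) (d : PySem.Dict (String × String) Nat) : Prop :=
  (∀ t j, d.get? t = some j →
      pvPred ne t = true ∧ j < pre.length ∧ pre[j]? = some t ∧ ∀ k, j < k → pre[k]? ≠ some t)
  ∧ (∀ t, pvPred ne t = true → t ∈ pre → (d.get? t).isSome)

lemma pv_index?_append_cons_self (l r : List (String × String)) (x : String × String)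
    (h : x ∉ l) : PySem.List.index? (l ++ x :: r) x = some l.length := by
  induction l with
  | nil => simpa using PySem.List.index?_cons_self x r
  | cons a l ih =>
      have hax : a ≠ x := by intro he; exact h (he ▸ List.mem_cons_self)
      have h' : x ∉ l := fun hm => h (List.mem_cons_of_mem a hm)
      rw [List.cons_append, PySem.List.index?_cons_of_ne _ hax, ih h']
      simp

lemma pv_index_eq (ne : List String) (posTag pre rest : List (String × String))
    (x : String × String) (d : PySem.Dict (String × String) Nat)
    (hinv : pvInv ne pre d) (hx : pvPred ne x = true) (hpt : posTag = pre ++ x :: rest) :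
    (match d.get? x with
      | some prev => (pvIndexFrom posTag x (prev + 1)).getD 0
      | none => (PySem.List.index? posTag x).getD 0) = pre.length := by
  obtain ⟨h1, h2⟩ := hinv
  cases hget : d.get? x with
  | none =>
      have hnot : x ∉ pre := by
        intro hm
        have := h2 x hx hm
        rw [hget] at this; simp at this
      simp only [hpt]
      rw [pv_index?_append_cons_self pre rest x hnot]
      rfl
  | some prev =>
      obtain ⟨_, hlt, _, hlast⟩ := h1 x prev hget
      have hnd : x ∉ pre.drop (prev + 1) := by
        intro hm
        obtain ⟨k, hk, hkx⟩ := List.getElem_of_mem hm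
        have hklen : prev + 1 + k < pre.length := by
          have := hk; rw [List.length_drop] at this; omega
        have hsome : pre[prev + 1 + k]? = some x := by
          rw [List.getElem?_eq_getElem hklen]
          exact congrArg some ((List.getElem_drop (xs := pre) (i := prev + 1) (j := k) (h := hk)).symm.trans hkx)
        exact hlast (prev + 1 + k) (by omega) hsome
      have hdrop : posTag.drop (prev + 1) = pre.drop (prev + 1) ++ x :: rest := by
        rw [hpt, List.drop_append]
        have h0 : prev + 1 - pre.length = 0 := by omega
        rw [h0, List.drop_zero]
      show (pvIndexFrom posTag x (prev + 1)).getD 0 = pre.length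
      unfold pvIndexFrom
      rw [hdrop, pv_index?_append_cons_self _ rest x hnd]
      simp [List.length_drop]
      omega

lemma pvInv_nil (ne : List String) : pvInv ne [] PySem.Dict.empty := by
  constructor
  · intro t j h; simp [PySem.Dict.get?_empty] at h
  · intro t _ h; simp at h

lemma pvInv_skip (ne : List String) (pre : List (String × String)) (x : String × String)
    (d : PySem.Dict (String × String) Nat) (hx : pvPred ne x = false) (hinv : pvInv ne pre d) :
    pvInv ne (pre ++ [x]) d := by
  obtain ⟨h1, h2⟩ := hinv
  constructor
  · intro t j hget
    obtain ⟨hp, hlt, hat, hlast⟩ := h1 t j hget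
    refine ⟨hp, by simp; omega, by rw [List.getElem?_append_left hlt]; exact hat, ?_⟩
    intro k hk
    rcases lt_trichotomy k pre.length with h | h | h
    · rw [List.getElem?_append_left h]; exact hlast k hk
    · subst h
      rw [List.getElem?_append_right (le_refl _)]
      simp
      intro he
      subst he; simp [hp] at hx
    · rw [List.getElem?_eq_none_iff.mpr (by simp; omega)]; simp
  · intro t hp hm
    rcases List.mem_append.mp hm with h | h
    · exact h2 t hp h
    · simp at h; subst h; simp [hp] at hx

lemma pvInv_step (ne : List String) (pre : List (String × String)) (x : String × String)
    (d : PySem.Dict (String × String) Nat) (hx : pvPred ne x = true) (hinv : pvInv ne pre d) :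
    pvInv ne (pre ++ [x]) (d.insert x pre.length) := by
  obtain ⟨h1, h2⟩ := hinv
  constructor
  · intro t j hget
    by_cases hte : t = x
    · subst hte
      rw [PySem.Dict.get?_insert_self] at hget
      obtain rfl : pre.length = j := by simpa using hget
      refine ⟨hx, by simp, ?_, ?_⟩
      · rw [List.getElem?_append_right (le_refl _)]; simp
      · intro k hk
        rw [List.getElem?_eq_none_iff.mpr (by simp; omega)]; simp
    · rw [PySem.Dict.get?_insert_of_ne _ _ hte] at hget
      obtain ⟨hp, hlt, hat, hlast⟩ := h1 t j hget
      refine ⟨hp, by simp; omega, by rw [List.getElem?_append_left hlt]; exact hat, ?_⟩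
      intro k hk
      rcases lt_trichotomy k pre.length with h | h | h
      · rw [List.getElem?_append_left h]; exact hlast k hk
      · subst h
        rw [List.getElem?_append_right (le_refl _)]
        simp
        intro he; exact hte he.symm
      · rw [List.getElem?_eq_none_iff.mpr (by simp; omega)]; simp
  · intro t hp hm
    by_cases hte : t = x
    · subst hte; rw [PySem.Dict.get?_insert_self]; simp
    · rw [PySem.Dict.get?_insert_of_ne _ _ hte]
      rcases List.mem_append.mp hm with h | h
      · exact h2 t hp h
      · simp at h; exact absurd h hte

-- Chars-level: joining one more piece appends sep ++ piece
lemma pv_cjoin_snoc (sep u : List Char) : ∀ (w : List Char) (acc : List (List Char)),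
    PySem.Chars.join sep ((w :: acc) ++ [u]) = PySem.Chars.join sep (w :: acc) ++ sep ++ u := by
  intro w acc
  induction acc generalizing w with
  | nil => rw [List.cons_append, List.nil_append, PySem.Chars.join_cons_cons,
      PySem.Chars.join_singleton, PySem.Chars.join_singleton]
  | cons b acc ih =>
      rw [show (w :: b :: acc) ++ [u] = w :: b :: (acc ++ [u]) from by simp,
        PySem.Chars.join_cons_cons sep w b (acc ++ [u]), ← List.cons_append, ih b,
        PySem.Chars.join_cons_cons]
      simp [List.append_assoc]

lemma pv_join_snoc (w u : String) (acc : List String) :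
    PySem.Str.join " " ((w :: acc) ++ [u]) = PySem.Str.join " " (w :: acc) ++ " " ++ u := by
  apply String.ext
  show (PySem.Str.join " " ((w :: acc) ++ [u])).toList = _
  rw [PySem.Str.toList_join]
  have : (PySem.Str.join " " (w :: acc) ++ " " ++ u).toList
      = PySem.Chars.join " ".toList ((w :: acc).map String.toList) ++ " ".toList ++ u.toList := by
    rw [String.toList_append, String.toList_append, PySem.Str.toList_join]
  rw [this]
  simpa using pv_cjoin_snoc " ".toList u.toList w.toList (acc.map String.toList)

lemma pv_keep_eq (t : String) : PySem.Set.contains pvKeep t = pvTagList.contains t := by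
  have h : pvKeep = pvTagList := by decide
  rw [h, PySem.Set.contains_eq_listContains]

-- A's inner string loop computes the join of B's parts loop
lemma pv_fold_join (posTag : List (String × String)) : ∀ (js : List Int) (w : String) (acc : List String),
    js.foldl (fun result j =>
        let wt := (PySem.List.pyGet? posTag j).getD ("", "")
        if pvTagList.contains wt.2 then result ++ " " ++ wt.1 else result)
      (PySem.Str.join " " (w :: acc))
    = PySem.Str.join " " (js.foldl (fun parts j =>
        let wt := (PySem.List.pyGet? posTag j).getD ("", "")
        if PySem.Set.contains pvKeep wt.2 then parts ++ [wt.1] else parts) (w :: acc)) := by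
  intro js
  induction js with
  | nil => intro w acc; rfl
  | cons j js ih =>
      intro w acc
      simp only [List.foldl_cons, pv_keep_eq]
      by_cases hc : pvTagList.contains ((PySem.List.pyGet? posTag j).getD ("", "")).2 = true
      · simp only [hc, if_true]
        rw [← pv_join_snoc w _ acc]
        simpa using ih w (acc ++ [((PySem.List.pyGet? posTag j).getD ("", "")).1])
      · simp only [hc, if_false, Bool.false_eq_true]
        exact ih w acc

-- the string A builds at a valid index equals B's emit there
lemma pv_emit_eq (posTag : List (String × String)) (index : Nat) (x : String × String)
    (hx : posTag[index]? = some x) :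
    (PySem.List.pyRange (index : Int)
        ((if posTag.length > index + 4 then index + 4 else posTag.length : Nat) : Int) 1).foldl
      (fun result j =>
        let wt := (PySem.List.pyGet? posTag j).getD ("", "")
        if pvTagList.contains wt.2 then result ++ " " ++ wt.1 else result)
      ("" ++ (posTag[index]?.map Prod.fst).getD "" ++ "")
    = pvEmitB posTag posTag.length (index : Int) x.1 := by
  have hb : ((if posTag.length > index + 4 then index + 4 else posTag.length : Nat) : Int)
      = min ((index : Int) + 4) (posTag.length : Int) := by
    split_ifs with h <;> push_cast <;> omega
  have hw : ("" ++ (posTag[index]?.map Prod.fst).getD "" ++ "") = PySem.Str.join " " [x.1] := by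
    rw [hx]
    refine String.ext ?_
    show ("" ++ x.1 ++ "").toList = (PySem.Str.join " " [x.1]).toList
    rw [PySem.Str.toList_join]
    simp [PySem.Chars.join_singleton]
  rw [hb, hw]
  unfold pvEmitB
  exact pv_fold_join posTag _ x.1 []

lemma pv_main (posTag : List (String × String)) (gazetteer : List (String × List String))
    (ne : List String) :
    ∀ (suf pre : List (String × String)) (d : PySem.Dict (String × String) Nat)
      (out : List String), pvInv ne pre d → posTag = pre ++ suf →
    ((suf.filter (fun x => x.2 == "CD" && !(ne.contains x.1))).foldl
        (pvStepA posTag gazetteer) (d, out)).2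
    = out ++ ((PySem.List.enumerate suf (pre.length : Int)).filter
        (fun p => pvPred ne p.2)).map (fun p => pvEmitB posTag posTag.length p.1 p.2.1) := by
  intro suf
  induction suf with
  | nil => intro pre d out _ _; simp [PySem.List.enumerate_nil]
  | cons x rest ih =>
      intro pre d out hinv hpt
      rw [PySem.List.enumerate_cons]
      by_cases hx : (x.2 == "CD" && !(ne.contains x.1)) = true
      · rw [List.filter_cons, if_pos hx, List.foldl_cons]
        have hxat : posTag[pre.length]? = some x := by
          rw [hpt, List.getElem?_append_right (le_refl _)]
          simp
        have hstep : pvStepA posTag gazetteer (d, out) x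
            = (d.insert x pre.length,
               out ++ [pvEmitB posTag posTag.length (pre.length : Int) x.1]) := by
          simp only [pvStepA]
          rw [pv_index_eq ne posTag pre rest x d hinv hx hpt, ite_self]
          rw [pv_emit_eq posTag pre.length x hxat]
        rw [hstep]
        rw [ih (pre ++ [x]) (d.insert x pre.length)
            (out ++ [pvEmitB posTag posTag.length (pre.length : Int) x.1])
            (pvInv_step ne pre x d hx hinv) (by rw [hpt]; simp)]
        rw [List.filter_cons, if_pos (show pvPred ne (((pre.length : Int), x) : Int × (String × String)).2 = true from hx)]
        simp [List.length_append]
      · have hxf : pvPred ne x = false := by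
          cases h : pvPred ne x
          · rfl
          · exact absurd h hx
        rw [List.filter_cons, if_neg hx]
        rw [ih (pre ++ [x]) d out (pvInv_skip ne pre x d hxf hinv) (by rw [hpt]; simp)]
        rw [List.filter_cons, if_neg (show ¬ (pvPred ne (((pre.length : Int), x) : Int × (String × String)).2 = true) from hx)]
        simp [List.length_append]

-- ===== VERDICT (by name: the statement is the Claim_ definition above) =====
theorem MeasuredEntityDetection_spec : Claim_equal_MeasuredEntityDetection := by
  intro posTag gazetteer ne _
  unfold Spec_MeasuredEntityDetection
  simp only [MeasuredEntityDetection, MeasuredEntityDetection_alt]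
  rw [PySem.List.foldl_append_if (fun p => p.2.2 == "CD" && !(ne.contains p.2.1))
      (fun p => pvEmitB posTag posTag.length p.1 p.2.1) (PySem.List.enumerate posTag) []]
  have := pv_main posTag gazetteer ne posTag [] PySem.Dict.empty [] (pvInv_nil ne) (by simp)
  simpa [pvPred] using this
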